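-- pv_equiv track=rewrite | github.com/hmcts/azure-pricing-api-comparison | compare_disk_prices.py | get_standardssd_tier
-- ===== SOURCE A (Python) =====
-- def get_standardssd_tier(size_gb):
--     # Mapping based on Azure Standard SSD disk sizes (as of 2024)
--     # https://learn.microsoft.com/en-us/azure/virtual-machines/disks-types#standard-ssd
--     # This can be extended as needed
--     size_to_tier = [
--         (4, "E1"),
--         (8, "E2"),
--         (16, "E3"),
--         (32, "E4"),
--         (64, "E6"),
--         (128, "E10"),
--         (256, "E15"),
--         (512, "E20"),
--         (1024, "E30"),
--         (2048, "E40"),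
--         (4096, "E50"),
--         (8192, "E60"),
--         (16384, "E70"),
--         (32767, "E80"),
--     ]
--     for max_size, tier in size_to_tier:
--         if size_gb <= max_size:
--             return tier
--     return f"E{size_gb}"  # fallback
-- ===== SOURCE B (Python) =====
-- _THRESHOLDS = [4, 8, 16, 32, 64, 128, 256, 512, 1024, 2048, 4096, 8192, 16384, 32767]
-- _TIERS = ["E1", "E2", "E3", "E4", "E6", "E10", "E15", "E20", "E30", "E40", "E50", "E60", "E70", "E80"]
--
--
-- def _bisect_left(a, x, lo, hi):
--     # index of the first element of a that is >= x (binary search)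
--     while lo < hi:
--         mid = (lo + hi) // 2
--         if a[mid] < x:
--             lo = mid + 1
--         else:
--             hi = mid
--     return lo
--
--
-- def get_standardssd_tier(size_gb):
--     i = _bisect_left(_THRESHOLDS, size_gb, 0, len(_THRESHOLDS))
--     if i < len(_THRESHOLDS):
--         return _TIERS[i]
--     return f"E{size_gb}"  # fallback
-- ===== Notes on version B (the rewrite author's own statement) =====
-- stated objective: alternative
-- what changed: Replaces the linear scan over the (size, tier) pair table with a hand-written binary search (bisect_left) over a thresholds list paired with a parallel tiers list.
import Mathlib
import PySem

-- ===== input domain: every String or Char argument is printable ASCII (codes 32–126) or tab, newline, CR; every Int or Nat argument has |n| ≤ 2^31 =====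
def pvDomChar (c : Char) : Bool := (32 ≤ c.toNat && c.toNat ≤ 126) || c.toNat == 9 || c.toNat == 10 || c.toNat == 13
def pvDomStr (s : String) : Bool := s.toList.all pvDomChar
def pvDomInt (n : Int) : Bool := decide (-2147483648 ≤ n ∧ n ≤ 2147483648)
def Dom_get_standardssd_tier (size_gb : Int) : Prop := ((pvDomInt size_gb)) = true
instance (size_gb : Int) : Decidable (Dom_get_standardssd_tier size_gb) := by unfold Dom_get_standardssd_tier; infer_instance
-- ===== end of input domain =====

-- B replaces A's linear scan of the tier table with a binary search (bisect_left) over a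
-- thresholds list and a parallel tiers list; same result, alternative algorithm.

-- ===== PORT A =====
def sizeToTier : List (Int × String) :=
  [(4, "E1"), (8, "E2"), (16, "E3"), (32, "E4"), (64, "E6"), (128, "E10"),
   (256, "E15"), (512, "E20"), (1024, "E30"), (2048, "E40"), (4096, "E50"),
   (8192, "E60"), (16384, "E70"), (32767, "E80")]

-- the for-loop with early return; the [] case is the fall-through fallback f"E{size_gb}"
def scanTier (size_gb : Int) : List (Int × String) → String
  | [] => "E" ++ PySem.Int.toStr size_gb
  | (max_size, tier) :: rest =>
      if size_gb ≤ max_size then tier else scanTier size_gb rest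

def get_standardssd_tier (size_gb : Int) : String :=
  scanTier size_gb sizeToTier

-- ===== PORT B =====
def pvThresholds : List Int :=
  [4, 8, 16, 32, 64, 128, 256, 512, 1024, 2048, 4096, 8192, 16384, 32767]
def pvTiers : List String :=
  ["E1", "E2", "E3", "E4", "E6", "E10", "E15", "E20", "E30", "E40", "E50", "E60", "E70", "E80"]

-- Source B's hand-written bisect_left loop; fuel = hi - lo makes the while-loop total
def pvBisect (x : Int) : Nat → Nat → Nat → Nat
  | 0, lo, _ => lo
  | fuel + 1, lo, hi =>
      if lo < hi then
        let mid := (lo + hi) / 2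
        if pvThresholds.getD mid 0 < x then pvBisect x fuel (mid + 1) hi
        else pvBisect x fuel lo mid
      else lo

def get_standardssd_tier_alt (size_gb : Int) : String :=
  let i := pvBisect size_gb pvThresholds.length 0 pvThresholds.length
  if i < pvThresholds.length then pvTiers.getD i ""
  else "E" ++ PySem.Int.toStr size_gb

-- ===== PRECONDITION & SPEC =====
def Spec_get_standardssd_tier (size_gb : Int) (out : String) : Prop := out = get_standardssd_tier_alt size_gb
instance (size_gb : Int) (out : String) : Decidable (Spec_get_standardssd_tier size_gb out) := by unfold Spec_get_standardssd_tier; infer_instance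

-- ===== CLAIM (what is proved, stated in full; the proofs are below) =====
def Claim_equal_get_standardssd_tier : Prop := ∀ (size_gb : Int), Dom_get_standardssd_tier size_gb → Spec_get_standardssd_tier size_gb (get_standardssd_tier size_gb)

-- ===== LEMMAS AND PROOFS =====
theorem pv_key (s : Int) : get_standardssd_tier s = get_standardssd_tier_alt s := by
  by_cases h0 : s ≤ 4
  · simp [get_standardssd_tier, get_standardssd_tier_alt, scanTier, sizeToTier, pvBisect, pvThresholds, pvTiers,
      show s ≤ (4:Int) by omega,
      show ¬ (512:Int) < s by omega,
      show ¬ (32:Int) < s by omega,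
      show ¬ (8:Int) < s by omega,
      show ¬ (4:Int) < s by omega]
  by_cases h1 : s ≤ 8
  · simp [get_standardssd_tier, get_standardssd_tier_alt, scanTier, sizeToTier, pvBisect, pvThresholds, pvTiers,
      show ¬ s ≤ (4:Int) by omega,
      show s ≤ (8:Int) by omega,
      show ¬ (512:Int) < s by omega,
      show ¬ (32:Int) < s by omega,
      show ¬ (8:Int) < s by omega,
      show (4:Int) < s by omega]
  by_cases h2 : s ≤ 16
  · simp [get_standardssd_tier, get_standardssd_tier_alt, scanTier, sizeToTier, pvBisect, pvThresholds, pvTiers,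
      show ¬ s ≤ (4:Int) by omega,
      show ¬ s ≤ (8:Int) by omega,
      show s ≤ (16:Int) by omega,
      show ¬ (512:Int) < s by omega,
      show ¬ (32:Int) < s by omega,
      show (8:Int) < s by omega,
      show ¬ (16:Int) < s by omega]
  by_cases h3 : s ≤ 32
  · simp [get_standardssd_tier, get_standardssd_tier_alt, scanTier, sizeToTier, pvBisect, pvThresholds, pvTiers,
      show ¬ s ≤ (4:Int) by omega,
      show ¬ s ≤ (8:Int) by omega,
      show ¬ s ≤ (16:Int) by omega,
      show s ≤ (32:Int) by omega,
      show ¬ (512:Int) < s by omega,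
      show ¬ (32:Int) < s by omega,
      show (8:Int) < s by omega,
      show (16:Int) < s by omega]
  by_cases h4 : s ≤ 64
  · simp [get_standardssd_tier, get_standardssd_tier_alt, scanTier, sizeToTier, pvBisect, pvThresholds, pvTiers,
      show ¬ s ≤ (4:Int) by omega,
      show ¬ s ≤ (8:Int) by omega,
      show ¬ s ≤ (16:Int) by omega,
      show ¬ s ≤ (32:Int) by omega,
      show s ≤ (64:Int) by omega,
      show ¬ (512:Int) < s by omega,
      show (32:Int) < s by omega,
      show ¬ (128:Int) < s by omega,
      show ¬ (64:Int) < s by omega]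
  by_cases h5 : s ≤ 128
  · simp [get_standardssd_tier, get_standardssd_tier_alt, scanTier, sizeToTier, pvBisect, pvThresholds, pvTiers,
      show ¬ s ≤ (4:Int) by omega,
      show ¬ s ≤ (8:Int) by omega,
      show ¬ s ≤ (16:Int) by omega,
      show ¬ s ≤ (32:Int) by omega,
      show ¬ s ≤ (64:Int) by omega,
      show s ≤ (128:Int) by omega,
      show ¬ (512:Int) < s by omega,
      show (32:Int) < s by omega,
      show ¬ (128:Int) < s by omega,
      show (64:Int) < s by omega]
  by_cases h6 : s ≤ 256
  · simp [get_standardssd_tier, get_standardssd_tier_alt, scanTier, sizeToTier, pvBisect, pvThresholds, pvTiers,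
      show ¬ s ≤ (4:Int) by omega,
      show ¬ s ≤ (8:Int) by omega,
      show ¬ s ≤ (16:Int) by omega,
      show ¬ s ≤ (32:Int) by omega,
      show ¬ s ≤ (64:Int) by omega,
      show ¬ s ≤ (128:Int) by omega,
      show s ≤ (256:Int) by omega,
      show ¬ (512:Int) < s by omega,
      show (32:Int) < s by omega,
      show (128:Int) < s by omega,
      show ¬ (256:Int) < s by omega]
  by_cases h7 : s ≤ 512
  · simp [get_standardssd_tier, get_standardssd_tier_alt, scanTier, sizeToTier, pvBisect, pvThresholds, pvTiers,
      show ¬ s ≤ (4:Int) by omega,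
      show ¬ s ≤ (8:Int) by omega,
      show ¬ s ≤ (16:Int) by omega,
      show ¬ s ≤ (32:Int) by omega,
      show ¬ s ≤ (64:Int) by omega,
      show ¬ s ≤ (128:Int) by omega,
      show ¬ s ≤ (256:Int) by omega,
      show s ≤ (512:Int) by omega,
      show ¬ (512:Int) < s by omega,
      show (32:Int) < s by omega,
      show (128:Int) < s by omega,
      show (256:Int) < s by omega]
  by_cases h8 : s ≤ 1024
  · simp [get_standardssd_tier, get_standardssd_tier_alt, scanTier, sizeToTier, pvBisect, pvThresholds, pvTiers,
      show ¬ s ≤ (4:Int) by omega,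
      show ¬ s ≤ (8:Int) by omega,
      show ¬ s ≤ (16:Int) by omega,
      show ¬ s ≤ (32:Int) by omega,
      show ¬ s ≤ (64:Int) by omega,
      show ¬ s ≤ (128:Int) by omega,
      show ¬ s ≤ (256:Int) by omega,
      show ¬ s ≤ (512:Int) by omega,
      show s ≤ (1024:Int) by omega,
      show (512:Int) < s by omega,
      show ¬ (8192:Int) < s by omega,
      show ¬ (2048:Int) < s by omega,
      show ¬ (1024:Int) < s by omega]
  by_cases h9 : s ≤ 2048
  · simp [get_standardssd_tier, get_standardssd_tier_alt, scanTier, sizeToTier, pvBisect, pvThresholds, pvTiers,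
      show ¬ s ≤ (4:Int) by omega,
      show ¬ s ≤ (8:Int) by omega,
      show ¬ s ≤ (16:Int) by omega,
      show ¬ s ≤ (32:Int) by omega,
      show ¬ s ≤ (64:Int) by omega,
      show ¬ s ≤ (128:Int) by omega,
      show ¬ s ≤ (256:Int) by omega,
      show ¬ s ≤ (512:Int) by omega,
      show ¬ s ≤ (1024:Int) by omega,
      show s ≤ (2048:Int) by omega,
      show (512:Int) < s by omega,
      show ¬ (8192:Int) < s by omega,
      show ¬ (2048:Int) < s by omega,
      show (1024:Int) < s by omega]
  by_cases h10 : s ≤ 4096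
  · simp [get_standardssd_tier, get_standardssd_tier_alt, scanTier, sizeToTier, pvBisect, pvThresholds, pvTiers,
      show ¬ s ≤ (4:Int) by omega,
      show ¬ s ≤ (8:Int) by omega,
      show ¬ s ≤ (16:Int) by omega,
      show ¬ s ≤ (32:Int) by omega,
      show ¬ s ≤ (64:Int) by omega,
      show ¬ s ≤ (128:Int) by omega,
      show ¬ s ≤ (256:Int) by omega,
      show ¬ s ≤ (512:Int) by omega,
      show ¬ s ≤ (1024:Int) by omega,
      show ¬ s ≤ (2048:Int) by omega,
      show s ≤ (4096:Int) by omega,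
      show (512:Int) < s by omega,
      show ¬ (8192:Int) < s by omega,
      show (2048:Int) < s by omega,
      show ¬ (4096:Int) < s by omega]
  by_cases h11 : s ≤ 8192
  · simp [get_standardssd_tier, get_standardssd_tier_alt, scanTier, sizeToTier, pvBisect, pvThresholds, pvTiers,
      show ¬ s ≤ (4:Int) by omega,
      show ¬ s ≤ (8:Int) by omega,
      show ¬ s ≤ (16:Int) by omega,
      show ¬ s ≤ (32:Int) by omega,
      show ¬ s ≤ (64:Int) by omega,
      show ¬ s ≤ (128:Int) by omega,
      show ¬ s ≤ (256:Int) by omega,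
      show ¬ s ≤ (512:Int) by omega,
      show ¬ s ≤ (1024:Int) by omega,
      show ¬ s ≤ (2048:Int) by omega,
      show ¬ s ≤ (4096:Int) by omega,
      show s ≤ (8192:Int) by omega,
      show (512:Int) < s by omega,
      show ¬ (8192:Int) < s by omega,
      show (2048:Int) < s by omega,
      show (4096:Int) < s by omega]
  by_cases h12 : s ≤ 16384
  · simp [get_standardssd_tier, get_standardssd_tier_alt, scanTier, sizeToTier, pvBisect, pvThresholds, pvTiers,
      show ¬ s ≤ (4:Int) by omega,
      show ¬ s ≤ (8:Int) by omega,
      show ¬ s ≤ (16:Int) by omega,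
      show ¬ s ≤ (32:Int) by omega,
      show ¬ s ≤ (64:Int) by omega,
      show ¬ s ≤ (128:Int) by omega,
      show ¬ s ≤ (256:Int) by omega,
      show ¬ s ≤ (512:Int) by omega,
      show ¬ s ≤ (1024:Int) by omega,
      show ¬ s ≤ (2048:Int) by omega,
      show ¬ s ≤ (4096:Int) by omega,
      show ¬ s ≤ (8192:Int) by omega,
      show s ≤ (16384:Int) by omega,
      show (512:Int) < s by omega,
      show (8192:Int) < s by omega,
      show ¬ (32767:Int) < s by omega,
      show ¬ (16384:Int) < s by omega]
  by_cases h13 : s ≤ 32767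
  · simp [get_standardssd_tier, get_standardssd_tier_alt, scanTier, sizeToTier, pvBisect, pvThresholds, pvTiers,
      show ¬ s ≤ (4:Int) by omega,
      show ¬ s ≤ (8:Int) by omega,
      show ¬ s ≤ (16:Int) by omega,
      show ¬ s ≤ (32:Int) by omega,
      show ¬ s ≤ (64:Int) by omega,
      show ¬ s ≤ (128:Int) by omega,
      show ¬ s ≤ (256:Int) by omega,
      show ¬ s ≤ (512:Int) by omega,
      show ¬ s ≤ (1024:Int) by omega,
      show ¬ s ≤ (2048:Int) by omega,
      show ¬ s ≤ (4096:Int) by omega,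
      show ¬ s ≤ (8192:Int) by omega,
      show ¬ s ≤ (16384:Int) by omega,
      show s ≤ (32767:Int) by omega,
      show (512:Int) < s by omega,
      show (8192:Int) < s by omega,
      show ¬ (32767:Int) < s by omega,
      show (16384:Int) < s by omega]
  simp [get_standardssd_tier, get_standardssd_tier_alt, scanTier, sizeToTier, pvBisect, pvThresholds,
      show ¬ s ≤ (4:Int) by omega,
      show ¬ s ≤ (8:Int) by omega,
      show ¬ s ≤ (16:Int) by omega,
      show ¬ s ≤ (32:Int) by omega,
      show ¬ s ≤ (64:Int) by omega,
      show ¬ s ≤ (128:Int) by omega,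
      show ¬ s ≤ (256:Int) by omega,
      show ¬ s ≤ (512:Int) by omega,
      show ¬ s ≤ (1024:Int) by omega,
      show ¬ s ≤ (2048:Int) by omega,
      show ¬ s ≤ (4096:Int) by omega,
      show ¬ s ≤ (8192:Int) by omega,
      show ¬ s ≤ (16384:Int) by omega,
      show ¬ s ≤ (32767:Int) by omega,
      show (512:Int) < s by omega,
      show (8192:Int) < s by omega,
      show (32767:Int) < s by omega]

-- ===== VERDICT (by name: the statement is the Claim_ definition above) =====
theorem get_standardssd_tier_spec : Claim_equal_get_standardssd_tier := by
  intro s _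
  unfold Spec_get_standardssd_tier
  exact pv_key s
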